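-- pv_equiv track=rewrite | github.com/nanangn57/address_classification | main_wip.py | is_valid_combination
-- ===== SOURCE A (Python) =====
-- def is_valid_combination(combined_match):
--     increasing_index = -1
--     left_end_index = - 1
--     for item in combined_match:
--         if item[0] == -1 :
--             continue
--         # increasing index
--         if item[0] >= increasing_index:
--             increasing_index = item[0]
--         else:
--             return False
--         # non overlapping section
--         if item[0] >= left_end_index:
--             left_end_index = item[1]
--         else:
--             return False
--
--     return True
-- ===== SOURCE B (Python) =====
-- def is_valid_combination(combined_match):
--     starts = [s for s, e in combined_match if s != -1]
--     ends = [e for s, e in combined_match if s != -1]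
--     return starts == sorted(starts) and all(s >= pe for s, pe in zip(starts, [-1] + ends))
-- ===== Notes on version B (the rewrite author's own statement) =====
-- stated objective: alternative
-- what changed: Replaces A's fused early-return loop carrying two mutable state variables by a staged, state-free check: extract the start and end columns of the active matches, test monotonicity of the starts by comparing the list with its sorted copy, and test non-overlap by zipping the starts against the ends shifted by one (with a -1 sentinel).
import Mathlib
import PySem

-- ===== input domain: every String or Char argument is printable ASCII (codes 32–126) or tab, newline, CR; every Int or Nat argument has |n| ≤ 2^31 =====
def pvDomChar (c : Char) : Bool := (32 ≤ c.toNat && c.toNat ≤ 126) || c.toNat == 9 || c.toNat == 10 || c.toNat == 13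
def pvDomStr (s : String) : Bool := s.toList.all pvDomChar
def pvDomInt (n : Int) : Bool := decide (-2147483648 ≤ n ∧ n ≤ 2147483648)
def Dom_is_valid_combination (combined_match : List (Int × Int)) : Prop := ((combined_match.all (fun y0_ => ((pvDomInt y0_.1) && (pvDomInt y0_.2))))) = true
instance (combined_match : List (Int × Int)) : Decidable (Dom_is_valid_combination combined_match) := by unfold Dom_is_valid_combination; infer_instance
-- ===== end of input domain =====

-- B replaces A's fused early-return loop (two mutable state variables) by a staged check:
-- extract start/end columns of the active matches, test monotonicity by comparing the
-- starts with their sorted copy, and test non-overlap by a zip of starts against the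
-- shifted ends (objective: simpler).


-- ===== PORT A =====
-- A's loop with early return: structural recursion over the list carrying
-- (increasing_index, left_end_index), branches in A's order.
def isValidGoA (increasing_index left_end_index : Int) : List (Int × Int) → Bool
  | [] => true
  | item :: rest =>
    if item.1 = -1 then isValidGoA increasing_index left_end_index rest
    else
      if item.1 ≥ increasing_index then
        if item.1 ≥ left_end_index then isValidGoA item.1 item.2 rest
        else false
      else false

def is_valid_combination (combined_match : List (Int × Int)) : Bool :=
  isValidGoA (-1) (-1) combined_match

-- ===== PORT B =====
-- starts/ends columns of the active matches; sorted-copy comparison + zip against shifted ends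
def is_valid_combination_alt (combined_match : List (Int × Int)) : Bool :=
  let starts := (combined_match.filter (fun x => x.1 ≠ -1)).map (fun x => x.1)
  let ends := (combined_match.filter (fun x => x.1 ≠ -1)).map (fun x => x.2)
  decide (starts = PySem.List.sorted starts (fun x => x) false) &&
    (List.zip starts (((-1 : Int)) :: ends)).all (fun p => decide (p.1 ≥ p.2))

-- ===== PRECONDITION & SPEC =====
def Spec_is_valid_combination (combined_match : List (Int × Int)) (out : Bool) : Prop := out = is_valid_combination_alt combined_match
instance (combined_match : List (Int × Int)) (out : Bool) : Decidable (Spec_is_valid_combination combined_match out) := by unfold Spec_is_valid_combination; infer_instance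

-- ===== CLAIM (what is proved, stated in full; the proofs are below) =====
def Claim_equal_is_valid_combination : Prop := ∀ (combined_match : List (Int × Int)), Dom_is_valid_combination combined_match → Spec_is_valid_combination combined_match (is_valid_combination combined_match)

-- ===== LEMMAS AND PROOFS =====

-- Bool chain check used only to characterise A's loop
def chainB (inc : Int) : List Int → Bool
  | [] => true
  | s :: r => decide (inc ≤ s) && chainB s r

-- A's loop, characterised without state: a chain check on (inc :: starts) plus the
-- zip of starts against (le :: ends).
theorem isValidGoA_chain (l : List (Int × Int)) :
    ∀ inc le : Int,
      isValidGoA inc le l =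
        (chainB inc ((l.filter (fun x => x.1 ≠ -1)).map (fun x => x.1)) &&
         (List.zip ((l.filter (fun x => x.1 ≠ -1)).map (fun x => x.1))
            (le :: (l.filter (fun x => x.1 ≠ -1)).map (fun x => x.2))).all
            (fun p => decide (p.1 ≥ p.2))) := by
  induction l with
  | nil => intro inc le; simp [isValidGoA, chainB]
  | cons x rest ih =>
    intro inc le
    by_cases hx : x.1 = -1
    · simpa [isValidGoA, hx] using ih inc le
    · simp only [isValidGoA, List.filter_cons, decide_not, hx, decide_false,
        Bool.not_false, if_true, List.map_cons, List.zip_cons_cons, List.all_cons,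
        chainB]
      by_cases h1 : x.1 ≥ inc <;> by_cases h2 : x.1 ≥ le <;>
        simp [h1, h2, ih x.1 x.2, Bool.and_comm]

-- chainB is Pairwise of the sentinel-consed list
theorem chainB_eq_pairwise (l : List Int) :
    ∀ inc : Int, chainB inc l = decide ((inc :: l).Pairwise (fun a b => a ≤ b)) := by
  induction l with
  | nil => intro inc; simp [chainB]
  | cons s r ih =>
    intro inc
    rw [chainB, ih s, ← Bool.decide_and, decide_eq_decide]
    simp only [List.pairwise_cons, List.mem_cons]
    constructor
    · rintro ⟨h1, h2, h3⟩
      refine ⟨fun b hb => ?_, h2, h3⟩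
      rcases hb with rfl | hb
      · exact h1
      · exact le_trans h1 (h2 b hb)
    · rintro ⟨h1, h2, h3⟩
      exact ⟨h1 s (Or.inl rfl), h2, h3⟩

-- starts == sorted(starts) is exactly pairwise-monotone
theorem eq_sorted_iff_pairwise (starts : List Int) :
    starts = PySem.List.sorted starts (fun x => x) false ↔
      starts.Pairwise (fun a b => a ≤ b) := by
  constructor
  · intro h
    have := PySem.List.sorted_pairwise (xs := starts) (key := fun x : Int => x)
    rw [← h] at this
    exact this
  · intro h
    exact (PySem.List.sorted_eq_self_of_pairwise starts (fun x => x) h).symm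

-- ===== VERDICT (by name: the statement is the Claim_ definition above) =====
theorem is_valid_combination_spec : Claim_equal_is_valid_combination := by
  intro cm _
  unfold Spec_is_valid_combination is_valid_combination is_valid_combination_alt
  rw [isValidGoA_chain]
  simp only []
  set starts := (cm.filter (fun x => x.1 ≠ -1)).map (fun x => x.1) with hs
  set ends := (cm.filter (fun x => x.1 ≠ -1)).map (fun x => x.2) with he
  rw [chainB_eq_pairwise,
    show (decide (starts = PySem.List.sorted starts (fun x => x) false))
        = decide (starts.Pairwise (fun a b => a ≤ b)) from by
      simp [eq_sorted_iff_pairwise]]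
  cases starts with
  | nil => simp
  | cons s0 srest =>
    by_cases h0 : (-1 : Int) ≤ s0
    · have hpw : List.Pairwise (fun a b : Int => a ≤ b) (-1 :: s0 :: srest) ↔
          List.Pairwise (fun a b : Int => a ≤ b) (s0 :: srest) := by
        simp only [List.pairwise_cons, List.mem_cons]
        constructor
        · rintro ⟨_, h2⟩; exact h2
        · rintro ⟨h2, h3⟩
          refine ⟨fun b hb => ?_, h2, h3⟩
          rcases hb with rfl | hb
          · exact h0
          · exact le_trans h0 (h2 b hb)
      rw [decide_eq_decide.mpr hpw]
    · rw [List.zip_cons_cons, List.all_cons]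
      simp [h0]
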